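-- pv_equiv track=rewrite | github.com/rasmith81-live/AnalyticsEngine | services/business_services/analytics_metadata_service/definitions/update_object_models_metadata.py | get_related_objects
-- ===== SOURCE A (Python) =====
-- def get_related_objects(object_name, object_to_kpis):
--     """Get objects that are commonly used together with this object."""
--     related = set()
--
--     # Find KPIs that use this object
--     if object_name in object_to_kpis:
--         for kpi in object_to_kpis[object_name]['kpis']:
--             # For each KPI, find other objects it uses
--             for obj, data in object_to_kpis.items():
--                 if obj != object_name:
--                     for kpi_data in data['kpis']:
--                         if kpi_data['code'] == kpi['code']:
--                             related.add(obj)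
--
--     return sorted(list(related))
-- ===== SOURCE B (Python) =====
-- def get_related_objects(object_name, object_to_kpis):
--     """Get objects that are commonly used together with this object."""
--     if object_name not in object_to_kpis:
--         return []
--     my_kpis = object_to_kpis[object_name]['kpis']
--     related = set()
--     if my_kpis:
--         # Invert once: kpi code -> objects (other than this one) using it.
--         index = {}
--         for obj, data in object_to_kpis.items():
--             if obj != object_name:
--                 for kd in data['kpis']:
--                     index.setdefault(kd['code'], []).append(obj)
--         if index:
--             for kpi in my_kpis:
--                 related.update(index.get(kpi['code'], ()))
--     return sorted(related)
-- ===== Notes on version B (the rewrite author's own statement) =====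
-- stated objective: alternative
-- what changed: A re-scans every object's whole KPI list once per KPI of the target object into a set; B inverts the data once into a code-to-objects index and then answers each of the target's KPI codes by one dictionary lookup.
import Mathlib
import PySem

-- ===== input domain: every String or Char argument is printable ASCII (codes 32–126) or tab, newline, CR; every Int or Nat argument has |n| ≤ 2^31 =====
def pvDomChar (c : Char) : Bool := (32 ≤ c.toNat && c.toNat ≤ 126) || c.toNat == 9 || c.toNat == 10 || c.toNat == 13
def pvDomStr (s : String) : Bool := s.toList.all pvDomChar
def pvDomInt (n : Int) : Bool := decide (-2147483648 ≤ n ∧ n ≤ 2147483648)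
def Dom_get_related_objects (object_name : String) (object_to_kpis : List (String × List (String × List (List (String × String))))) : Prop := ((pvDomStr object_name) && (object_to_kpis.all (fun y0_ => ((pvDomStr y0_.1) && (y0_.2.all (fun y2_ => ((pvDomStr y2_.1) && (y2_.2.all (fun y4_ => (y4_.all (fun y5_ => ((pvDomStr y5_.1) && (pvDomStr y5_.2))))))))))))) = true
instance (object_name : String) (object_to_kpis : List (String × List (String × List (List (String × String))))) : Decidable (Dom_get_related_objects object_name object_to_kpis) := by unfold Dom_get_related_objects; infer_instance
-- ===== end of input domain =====

-- B replaces A's triple nested scan (each of the target's KPIs re-scans every object's KPI list)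
-- with a code→objects index built once, each target KPI code then answered by one lookup.

-- ===== PORT A =====
-- data['kpis'] (KeyError when absent, excluded by Pre_)
def kpisOf (data : List (String × List (List (String × String)))) : List (List (String × String)) :=
  (PySem.Dict.get? (PySem.Dict.mk data) "kpis").getD []

-- kpi['code'] (KeyError when absent, excluded by Pre_)
def codeOf (kpi : List (String × String)) : String :=
  (PySem.Dict.get? (PySem.Dict.mk kpi) "code").getD ""

def get_related_objects (object_name : String) (object_to_kpis : List (String × List (String × List (List (String × String))))) : List String :=
  let d := PySem.Dict.mk object_to_kpis
  let related : PySem.Set String :=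
    if d.contains object_name then
      (kpisOf ((d.get? object_name).getD [])).foldl (fun related kpi =>
        d.items.foldl (fun related od =>
          if od.1 != object_name then
            (kpisOf od.2).foldl (fun related kpi_data =>
              if codeOf kpi_data == codeOf kpi then PySem.Set.add related od.1 else related)
              related
          else related) related) PySem.Set.empty
    else PySem.Set.empty
  PySem.List.sorted related (fun x => x) false

-- ===== PORT B =====
def get_related_objects_alt (object_name : String) (object_to_kpis : List (String × List (String × List (List (String × String))))) : List String :=
  let d := PySem.Dict.mk object_to_kpis
  if !d.contains object_name then []
  else
    let my_kpis := kpisOf ((d.get? object_name).getD [])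
    let related : PySem.Set String :=
      if my_kpis.isEmpty then PySem.Set.empty
      else
        -- index: kpi code -> objects (other than this one) using it; setdefault+append = modify with default []
        let index : PySem.Dict String (List String) :=
          d.items.foldl (fun idx od =>
            if od.1 != object_name then
              (kpisOf od.2).foldl (fun idx kd => idx.modify (codeOf kd) [] (· ++ [od.1])) idx
            else idx) PySem.Dict.empty
        if index.items.isEmpty then PySem.Set.empty
        else my_kpis.foldl (fun rel kpi => PySem.Set.update rel (index.getD (codeOf kpi) [])) PySem.Set.empty
    PySem.List.sorted related (fun x => x) false

-- ===== PRECONDITION & SPEC =====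
-- Pre_ excludes exactly the inputs on which the Python A raises a KeyError (a dict A actually
-- touches lacks its 'kpis'/'code' key; B's index build touches the same dicts and raises there
-- too), and association lists carrying a duplicate key at some dict level, which no Python dict
-- value can represent.
def Pre_get_related_objects (object_name : String) (object_to_kpis : List (String × List (String × List (List (String × String))))) : Prop :=
  ((object_to_kpis.map Prod.fst).Nodup ∧
    ∀ p ∈ object_to_kpis, (p.2.map Prod.fst).Nodup ∧
      ∀ q ∈ p.2, ∀ kpi ∈ q.2, (kpi.map Prod.fst).Nodup) ∧
  ((PySem.Dict.mk object_to_kpis).contains object_name = true →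
    (PySem.Dict.mk (((PySem.Dict.mk object_to_kpis).get? object_name).getD [])).contains "kpis" = true ∧
    (kpisOf (((PySem.Dict.mk object_to_kpis).get? object_name).getD []) ≠ [] →
      (∀ od ∈ object_to_kpis, od.1 ≠ object_name →
        (PySem.Dict.mk od.2).contains "kpis" = true ∧
        ∀ kd ∈ kpisOf od.2, (PySem.Dict.mk kd).contains "code" = true) ∧
      ((∃ od ∈ object_to_kpis, od.1 ≠ object_name ∧ kpisOf od.2 ≠ []) →
        ∀ kpi ∈ kpisOf (((PySem.Dict.mk object_to_kpis).get? object_name).getD []),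
          (PySem.Dict.mk kpi).contains "code" = true)))
instance (object_name : String) (object_to_kpis : List (String × List (String × List (List (String × String))))) : Decidable (Pre_get_related_objects object_name object_to_kpis) := by unfold Pre_get_related_objects; infer_instance

def pvWitness_get_related_objects : String × (List (String × List (String × List (List (String × String))))) :=
  ("a", [("a", [("kpis", [[("code", "x")]])]), ("b", [("kpis", [[("code", "x")], [("code", "y")]])])])

def Spec_get_related_objects (object_name : String) (object_to_kpis : List (String × List (String × List (List (String × String))))) (out : List String) : Prop := out = get_related_objects_alt object_name object_to_kpis
instance (object_name : String) (object_to_kpis : List (String × List (String × List (List (String × String))))) (out : List String) : Decidable (Spec_get_related_objects object_name object_to_kpis out) := by unfold Spec_get_related_objects; infer_instance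

-- ===== CLAIM (what is proved, stated in full; the proofs are below) =====
def Claim_equal_get_related_objects : Prop := ∀ (object_name : String) (object_to_kpis : List (String × List (String × List (List (String × String))))), Dom_get_related_objects object_name object_to_kpis → Pre_get_related_objects object_name object_to_kpis → Spec_get_related_objects object_name object_to_kpis (get_related_objects object_name object_to_kpis)

-- ===== LEMMAS AND PROOFS =====

-- generic: membership in a fold that only ever adds elements according to step-wise membership Q
theorem mem_foldl_step {β : Type} (l : List β) (step : PySem.Set String → β → PySem.Set String)
    (Q : β → String → Prop)
    (h : ∀ s b x, x ∈ step s b ↔ x ∈ s ∨ Q b x) :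
    ∀ (s : PySem.Set String) (x : String),
      x ∈ l.foldl step s ↔ x ∈ s ∨ ∃ b ∈ l, Q b x := by
  induction l with
  | nil => simp
  | cons b t ih =>
    intro s x
    simp [List.foldl_cons, ih, h]
    tauto

-- generic: such a fold preserves Nodup if each step does
theorem nodup_foldl_step {β : Type} (l : List β) (step : PySem.Set String → β → PySem.Set String)
    (h : ∀ s b, s.Nodup → (step s b).Nodup) :
    ∀ (s : PySem.Set String), s.Nodup → (l.foldl step s).Nodup := by
  induction l with
  | nil => exact fun _ h => h
  | cons b t ih => intro s hs; exact ih _ (h s b hs)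

-- membership characterisation of A's triple-nested accumulation
theorem memR (name : String) (items : List (String × List (String × List (List (String × String)))))
    (mykpis : List (List (String × String))) (x : String) :
    x ∈ mykpis.foldl (fun related kpi =>
        items.foldl (fun related od =>
          if od.1 != name then
            (kpisOf od.2).foldl (fun related kpi_data =>
              if codeOf kpi_data == codeOf kpi then PySem.Set.add related od.1 else related)
              related
          else related) related) PySem.Set.empty
    ↔ ∃ kpi ∈ mykpis, ∃ od ∈ items, od.1 ≠ name ∧ ∃ kd ∈ kpisOf od.2, codeOf kd = codeOf kpi ∧ x = od.1 := by
  rw [mem_foldl_step _ _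
    (fun kpi x => ∃ od ∈ items, od.1 ≠ name ∧ ∃ kd ∈ kpisOf od.2, codeOf kd = codeOf kpi ∧ x = od.1)]
  · simp [PySem.Set.empty]
  · intro s kpi x
    rw [mem_foldl_step _ _
      (fun od x => od.1 ≠ name ∧ ∃ kd ∈ kpisOf od.2, codeOf kd = codeOf kpi ∧ x = od.1)]
    intro s od x
    by_cases hne : od.1 = name
    · simp [hne]
    · simp only [hne, bne_iff_ne, ne_eq, not_false_iff, if_pos]
      rw [mem_foldl_step _ _ (fun kd x => codeOf kd = codeOf kpi ∧ x = od.1)]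
      · tauto
      · intro s kd x
        by_cases hco : codeOf kd = codeOf kpi
        · simp [hco, PySem.Set.mem_add]
        · simp [hco]

-- A's accumulated set has no duplicates
theorem nodupR (name : String) (items : List (String × List (String × List (List (String × String)))))
    (mykpis : List (List (String × String))) :
    (mykpis.foldl (fun related kpi =>
        items.foldl (fun related od =>
          if od.1 != name then
            (kpisOf od.2).foldl (fun related kpi_data =>
              if codeOf kpi_data == codeOf kpi then PySem.Set.add related od.1 else related)
              related
          else related) related) PySem.Set.empty).Nodup := by
  apply nodup_foldl_step
  · intro s kpi hs
    apply nodup_foldl_step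
    · intro s od hs
      by_cases hne : od.1 = name
      · simpa [hne] using hs
      · simp only [hne, bne_iff_ne, ne_eq, not_false_iff, if_pos]
        apply nodup_foldl_step
        · intro s kd hs
          by_cases hco : codeOf kd = codeOf kpi
          · simpa [hco] using PySem.Set.nodup_add s od.1 hs
          · simpa [hco] using hs
        · exact hs
    · exact hs
  · simp [PySem.Set.empty]

-- lookup in the index after the inner (per-object) build loop
theorem idx_inner (obj : String) :
    ∀ (kds : List (List (String × String))) (idx : PySem.Dict String (List String)) (c : String) (x : String),
      (x ∈ (kds.foldl (fun idx kd => idx.modify (codeOf kd) [] (· ++ [obj])) idx).getD c []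
      ↔ x ∈ idx.getD c [] ∨ (x = obj ∧ ∃ kd ∈ kds, codeOf kd = c)) := by
  intro kds
  induction kds with
  | nil => simp
  | cons kd t ih =>
    intro idx c x
    rw [List.foldl_cons, ih]
    rw [PySem.Dict.getD_modify]
    by_cases hc : c = codeOf kd
    · subst hc; simp
      tauto
    · simp [hc]
      have hkc : ¬ codeOf kd = c := fun h => hc h.symm
      tauto

-- lookup in the fully built index
theorem idx_outer (name : String) :
    ∀ (items : List (String × List (String × List (List (String × String)))))
      (idx : PySem.Dict String (List String)) (c : String) (x : String),
      (x ∈ (items.foldl (fun idx od =>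
            if od.1 != name then
              (kpisOf od.2).foldl (fun idx kd => idx.modify (codeOf kd) [] (· ++ [od.1])) idx
            else idx) idx).getD c []
      ↔ x ∈ idx.getD c [] ∨ ∃ od ∈ items, od.1 ≠ name ∧ ∃ kd ∈ kpisOf od.2, codeOf kd = c ∧ x = od.1) := by
  intro items
  induction items with
  | nil => simp
  | cons od t ih =>
    intro idx c x
    rw [List.foldl_cons]
    by_cases hne : od.1 = name
    · rw [if_neg (by simp [hne]), ih]
      simp [hne]
    · rw [if_pos (by simp [hne]), ih, idx_inner]
      simp only [ne_eq, List.mem_cons]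
      constructor
      · rintro ((h | ⟨rfl, kd, hkd, hco⟩) | ⟨od', hod', h'⟩)
        · exact .inl h
        · exact .inr ⟨od, .inl rfl, by tauto⟩
        · exact .inr ⟨od', .inr hod', h'⟩
      · rintro (h | ⟨od', (rfl | hod'), h'⟩)
        · exact .inl (.inl h)
        · exact .inl (.inr ⟨h'.2.elim (fun kd hkd => hkd.2.2), h'.2.elim (fun kd hkd => ⟨kd, hkd.1, hkd.2.1⟩)⟩)
        · exact .inr ⟨od', hod', h'⟩

-- an empty dict (as a value) looks up to the default
theorem getD_items_nil (d : PySem.Dict String (List String)) (h : d.items = []) (c : String) :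
    d.getD c [] = [] := by
  rcases d with ⟨items⟩
  simp at h
  subst h
  rfl

-- membership in B's final accumulation
theorem memB (mykpis : List (List (String × String))) (index : PySem.Dict String (List String)) (x : String) :
    x ∈ mykpis.foldl (fun rel kpi => PySem.Set.update rel (index.getD (codeOf kpi) [])) PySem.Set.empty
    ↔ ∃ kpi ∈ mykpis, x ∈ index.getD (codeOf kpi) [] := by
  rw [mem_foldl_step _ _ (fun kpi x => x ∈ index.getD (codeOf kpi) [])]
  · simp [PySem.Set.empty]
  · intro s kpi x
    exact PySem.Set.mem_update s _ x

-- B's accumulated set has no duplicates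
theorem nodupB (mykpis : List (List (String × String))) (index : PySem.Dict String (List String)) :
    (mykpis.foldl (fun rel kpi => PySem.Set.update rel (index.getD (codeOf kpi) [])) PySem.Set.empty).Nodup := by
  apply nodup_foldl_step
  · intro s kpi hs
    exact PySem.Set.nodup_update s _ hs
  · simp [PySem.Set.empty]

theorem get_related_objects_spec : Claim_equal_get_related_objects := by
  intro object_name otk _hdom _hpre
  unfold Spec_get_related_objects get_related_objects get_related_objects_alt
  by_cases hc : (PySem.Dict.mk otk).contains object_name = true
  · simp only [hc, Bool.not_true, if_true, Bool.false_eq_true, if_false]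
    set d := PySem.Dict.mk otk with hd
    set mykpis := kpisOf ((d.get? object_name).getD []) with hmk
    by_cases hemp : mykpis.isEmpty
    · rw [List.isEmpty_iff] at hemp
      simp only [hemp, List.isEmpty_nil, if_true]
      have : (([] : List (List (String × String))).foldl (fun related kpi =>
        d.items.foldl (fun related od =>
          if od.1 != object_name then
            (kpisOf od.2).foldl (fun related kpi_data =>
              if codeOf kpi_data == codeOf kpi then PySem.Set.add related od.1 else related)
              related
          else related) related) PySem.Set.empty) = PySem.Set.empty := rfl
      rw [hemp] at *
      rw [this]
    · simp only [hemp, Bool.false_eq_true, if_false]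
      set index : PySem.Dict String (List String) :=
        d.items.foldl (fun idx od =>
          if od.1 != object_name then
            (kpisOf od.2).foldl (fun idx kd => idx.modify (codeOf kd) [] (· ++ [od.1])) idx
          else idx) PySem.Dict.empty with hidx
      have hlook : ∀ c x, x ∈ index.getD c [] ↔
          ∃ od ∈ d.items, od.1 ≠ object_name ∧ ∃ kd ∈ kpisOf od.2, codeOf kd = c ∧ x = od.1 := by
        intro c x
        rw [hidx, idx_outer]
        have : (PySem.Dict.empty : PySem.Dict String (List String)).getD c [] = [] := rfl
        simp [this]
      by_cases hie : index.items.isEmpty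
      · rw [List.isEmpty_iff] at hie
        simp only [hie, List.isEmpty_nil, if_true]
        apply PySem.List.sorted_eq_sorted_of_perm _ _ _ (fun a b h => h)
        refine (List.perm_ext_iff_of_nodup (nodupR _ _ _) (by simp [PySem.Set.empty])).2 ?_
        intro x
        rw [memR]
        simp only [PySem.Set.empty, List.not_mem_nil, iff_false]
        rintro ⟨kpi, hkpi, od, hod, hne, kd, hkd, hco, rfl⟩
        have : od.1 ∈ index.getD (codeOf kpi) [] := (hlook _ _).2 ⟨od, hod, hne, kd, hkd, hco, rfl⟩
        rw [getD_items_nil index hie] at this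
        exact absurd this (List.not_mem_nil)
      · simp only [hie, Bool.false_eq_true, if_false]
        apply PySem.List.sorted_eq_sorted_of_perm _ _ _ (fun a b h => h)
        refine (List.perm_ext_iff_of_nodup (nodupR _ _ _) (nodupB _ _)).2 ?_
        intro x
        rw [memR, memB]
        constructor
        · rintro ⟨kpi, hkpi, od, hod, hne, kd, hkd, hco, rfl⟩
          exact ⟨kpi, hkpi, (hlook _ _).2 ⟨od, hod, hne, kd, hkd, hco, rfl⟩⟩
        · rintro ⟨kpi, hkpi, hx⟩
          obtain ⟨od, hod, hne, kd, hkd, hco, rfl⟩ := (hlook _ _).1 hx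
          exact ⟨kpi, hkpi, od, hod, hne, kd, hkd, hco, rfl⟩
  · simp [hc, PySem.List.sorted_eq_nil_iff]
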